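-- pv_equiv track=rewrite | github.com/huangzuomin/newspaper-layout-parser | parser_auditor/report.py | _determine_confidence
-- ===== SOURCE A (Python) =====
-- from typing import Dict, List, Any
--
-- def _determine_confidence(score: int, anomalies: Dict[str, List[Dict[str, Any]]]) -> str:
--     """
--     确定置信度
--
--     Args:
--         score: 总分
--         anomalies: 异常字典
--
--     Returns:
--         'high', 'medium', 或 'low'
--     """
--     # 统计异常数量和严重程度
--     total_anomalies = sum(len(v) for v in anomalies.values())
--
--     critical_count = sum(1 for v in anomalies.values()
--                        for a in v if a.get('severity') == 'critical')
--
--     high_count = sum(1 for v in anomalies.values()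
--                     for a in v if a.get('severity') == 'high')
--
--     # 基于分数和异常确定置信度
--     if score >= 80 and critical_count == 0 and high_count <= 1:
--         return 'high'
--     elif score >= 60 and critical_count == 0:
--         return 'medium'
--     else:
--         return 'low'
-- ===== SOURCE B (Python) =====
-- def _determine_confidence(score, anomalies):
--     # Early-exit decision procedure: no scan at all when the score already
--     # forces 'low'; otherwise one short-circuiting scan that bails out with
--     # 'low' at the first 'critical' and only tallies 'high' severities.
--     if score < 60:
--         return 'low'
--     highs = 0
--     for v in anomalies.values():
--         for a in v:
--             sev = a.get('severity')
--             if sev == 'critical':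
--                 return 'low'
--             if sev == 'high':
--                 highs += 1
--     if score >= 80 and highs <= 1:
--         return 'high'
--     return 'medium'
-- ===== Notes on version B (the rewrite author's own statement) =====
-- stated objective: alternative
-- what changed: B replaces A's three full passes and final threshold cascade by an early-exit decision procedure: it returns 'low' without scanning when score < 60, and otherwise makes a single short-circuiting scan that returns 'low' at the first 'critical' anomaly and only counts 'high' ones, so no total or critical counter is ever built.
import Mathlib
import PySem

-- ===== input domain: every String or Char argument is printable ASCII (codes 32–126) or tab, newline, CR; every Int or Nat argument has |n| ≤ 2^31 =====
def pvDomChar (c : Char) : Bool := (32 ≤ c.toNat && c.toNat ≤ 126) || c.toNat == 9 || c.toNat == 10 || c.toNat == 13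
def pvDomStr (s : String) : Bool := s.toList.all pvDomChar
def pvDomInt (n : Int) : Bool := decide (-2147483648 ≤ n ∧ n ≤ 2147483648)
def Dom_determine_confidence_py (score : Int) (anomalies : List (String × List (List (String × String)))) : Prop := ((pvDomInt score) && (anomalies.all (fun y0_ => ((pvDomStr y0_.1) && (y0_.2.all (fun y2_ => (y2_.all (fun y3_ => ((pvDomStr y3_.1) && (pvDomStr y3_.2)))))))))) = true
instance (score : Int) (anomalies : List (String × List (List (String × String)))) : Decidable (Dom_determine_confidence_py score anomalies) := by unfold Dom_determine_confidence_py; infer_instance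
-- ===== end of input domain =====

-- ===== PORT A =====
-- Header: B is an early-exit decision procedure (no scan when score < 60; one short-circuiting scan otherwise) instead of A's three full counting passes; objective: alternative decomposition, same asymptotic cost.
def determine_confidence_py (score : Int) (anomalies : List (String × List (List (String × String)))) : String :=
  let _total_anomalies : Int := anomalies.foldl (fun acc v => acc + (v.2.length : Int)) 0
  let critical_count : Int := anomalies.foldl (fun acc v =>
    v.2.foldl (fun acc2 a =>
      if (PySem.Dict.mk a).get? "severity" == some "critical" then acc2 + 1 else acc2) acc) 0
  let high_count : Int := anomalies.foldl (fun acc v =>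
    v.2.foldl (fun acc2 a =>
      if (PySem.Dict.mk a).get? "severity" == some "high" then acc2 + 1 else acc2) acc) 0
  if score ≥ 80 ∧ critical_count = 0 ∧ high_count ≤ 1 then "high"
  else if score ≥ 60 ∧ critical_count = 0 then "medium"
  else "low"

-- ===== PORT B =====
-- inner loop of Source B: 'none' models the early 'return low' at the first critical severity
def pvScanInner (l : List (List (String × String))) (h : Int) : Option Int :=
  match l with
  | [] => some h
  | a :: rest =>
    let sev := (PySem.Dict.mk a).get? "severity"
    if sev == some "critical" then none
    else pvScanInner rest (if sev == some "high" then h + 1 else h)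

def pvScanOuter (l : List (String × List (List (String × String)))) (h : Int) : Option Int :=
  match l with
  | [] => some h
  | v :: rest =>
    match pvScanInner v.2 h with
    | none => none
    | some h' => pvScanOuter rest h'

def determine_confidence_py_alt (score : Int) (anomalies : List (String × List (List (String × String)))) : String :=
  if score < 60 then "low"
  else
    match pvScanOuter anomalies 0 with
    | none => "low"
    | some highs => if score ≥ 80 ∧ highs ≤ 1 then "high" else "medium"

-- ===== PRECONDITION & SPEC =====
def Spec_determine_confidence_py (score : Int) (anomalies : List (String × List (List (String × String)))) (out : String) : Prop := out = determine_confidence_py_alt score anomalies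
instance (score : Int) (anomalies : List (String × List (List (String × String)))) (out : String) : Decidable (Spec_determine_confidence_py score anomalies out) := by unfold Spec_determine_confidence_py; infer_instance

-- ===== CLAIM (what is proved, stated in full; the proofs are below) =====
def Claim_equal_determine_confidence_py : Prop := ∀ (score : Int) (anomalies : List (String × List (List (String × String)))), Dom_determine_confidence_py score anomalies → Spec_determine_confidence_py score anomalies (determine_confidence_py score anomalies)

-- ===== LEMMAS AND PROOFS =====
-- An A-side counting loop equals the countP of the list.
lemma foldl_count_one (t : String) (l : List (List (String × String))) (c : Int) :
    l.foldl (fun acc2 a => if (PySem.Dict.mk a).get? "severity" == some t then acc2 + 1 else acc2) c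
      = c + (l.countP (fun a => (PySem.Dict.mk a).get? "severity" == some t) : Int) := by
  induction l generalizing c with
  | nil => simp
  | cons a l ih =>
    simp only [List.foldl_cons, List.countP_cons, ih]
    split_ifs <;> simp <;> omega

lemma countA_eq (t : String) (anomalies : List (String × List (List (String × String)))) (c : Int) :
    anomalies.foldl (fun acc v =>
        v.2.foldl (fun acc2 a => if (PySem.Dict.mk a).get? "severity" == some t then acc2 + 1 else acc2) acc) c
      = c + ((anomalies.flatMap (·.2)).countP (fun a => (PySem.Dict.mk a).get? "severity" == some t) : Int) := by
  induction anomalies generalizing c with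
  | nil => simp
  | cons v rest ih =>
    simp only [List.foldl_cons, List.flatMap_cons, List.countP_append]
    rw [foldl_count_one, ih]; push_cast; ring

-- B's short-circuiting scans, characterised by the critical/high counts.
lemma scanInner_eq (l : List (List (String × String))) (h : Int) :
    pvScanInner l h
      = if l.countP (fun a => (PySem.Dict.mk a).get? "severity" == some "critical") = 0
        then some (h + (l.countP (fun a => (PySem.Dict.mk a).get? "severity" == some "high") : Int))
        else none := by
  induction l generalizing h with
  | nil => simp [pvScanInner]
  | cons a rest ih =>
    by_cases hc : ((PySem.Dict.mk a).get? "severity" == some "critical") = true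
    · simp [pvScanInner, hc]
    · by_cases hh : ((PySem.Dict.mk a).get? "severity" == some "high") = true
      · simp only [pvScanInner, hc, List.countP_cons, ih, if_false, Bool.false_eq_true, hh,
          if_true, Nat.add_zero]
        split_ifs with h1
        · push_cast; ring_nf
        · rfl
      · simp only [pvScanInner, hc, List.countP_cons, ih, if_false, Bool.false_eq_true, hh,
          Nat.add_zero]

lemma scanOuter_eq (l : List (String × List (List (String × String)))) (h : Int) :
    pvScanOuter l h
      = if (l.flatMap (·.2)).countP (fun a => (PySem.Dict.mk a).get? "severity" == some "critical") = 0
        then some (h + ((l.flatMap (·.2)).countP (fun a => (PySem.Dict.mk a).get? "severity" == some "high") : Int))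
        else none := by
  induction l generalizing h with
  | nil => simp [pvScanOuter]
  | cons v rest ih =>
    simp only [pvScanOuter, scanInner_eq, List.flatMap_cons, List.countP_append]
    by_cases h1 : (v.2.countP (fun a => (PySem.Dict.mk a).get? "severity" == some "critical") = 0)
    · simp only [h1, if_true, Nat.zero_add, ih]
      split_ifs with h2
      · push_cast; ring_nf
      · rfl
    · have hne : ¬ (v.2.countP (fun a => (PySem.Dict.mk a).get? "severity" == some "critical")
          + (rest.flatMap (·.2)).countP (fun a => (PySem.Dict.mk a).get? "severity" == some "critical") = 0) := by
        omega
      rw [if_neg hne]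
      simp [h1]

-- ===== VERDICT (by name: the statement is the Claim_ definition above) =====
theorem determine_confidence_py_spec : Claim_equal_determine_confidence_py := by
  intro score anomalies _
  unfold Spec_determine_confidence_py determine_confidence_py determine_confidence_py_alt
  simp only [countA_eq, scanOuter_eq, zero_add]
  generalize ((anomalies.flatMap (·.2)).countP (fun a => (PySem.Dict.mk a).get? "severity" == some "critical")) = C
  generalize hH : (((anomalies.flatMap (·.2)).countP (fun a => (PySem.Dict.mk a).get? "severity" == some "high")) : Int) = H
  have hH0 : 0 ≤ H := hH ▸ Int.natCast_nonneg _
  rcases Nat.eq_zero_or_pos C with h0 | h0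
  · subst h0
    rw [if_pos (show (0:Nat) = 0 from rfl)]
    simp only [Nat.cast_zero]
    by_cases hs : score < 60
    · rw [if_pos hs,
        if_neg (fun h => absurd h.1 (by omega)),
        if_neg (fun h => absurd h.1 (by omega))]
    · rw [if_neg hs]
      show (if score ≥ 80 ∧ True ∧ H ≤ 1 then "high"
            else if score ≥ 60 ∧ True then "medium" else "low")
          = if score ≥ 80 ∧ H ≤ 1 then "high" else "medium"
      by_cases hA : score ≥ 80 ∧ H ≤ 1
      · rw [if_pos ⟨hA.1, trivial, hA.2⟩, if_pos hA]
      · rw [if_neg (fun h => hA ⟨h.1, h.2.2⟩), if_neg hA, if_pos ⟨by omega, trivial⟩]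
  · have hne : ¬ C = 0 := by omega
    rw [if_neg hne]
    have hpos : (0:Int) < (C : Int) := by exact_mod_cast h0
    split_ifs with h1 h2 h3 <;> first | rfl | (exfalso; omega)
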